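-- pv_equiv track=rewrite | github.com/imclab/Legend-of-Adventure | internals/entities/entities.py | get_placeable_locations
-- ===== SOURCE A (Python) =====
-- def get_placeable_locations(grid, hitmap):
--     """
--     We only want animats to be able to spawn on walkable surfaces, so only
--     return those locations.
--     """
--     # Make our life easy: if everything's walkable, tell the server to just
--     # pick a random location.
--     if all(all(not cell for cell in row) for row in hitmap):
--         return []
--
--     locations = []
--     hitmap_len = len(hitmap)
--     for rownum in range(int(0.1 * hitmap_len), int(0.9 * hitmap_len)):
--         row = hitmap[rownum]
--         row_len = len(row)
--         for cellnum in range(int(0.1 * row_len), int(0.9 * row_len)):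
--             if not row[cellnum]:
--                 locations.append((cellnum, rownum))
--     return locations if locations else None
-- ===== SOURCE B (Python) =====
-- def get_placeable_locations(grid, hitmap):
--     """
--     We only want animats to be able to spawn on walkable surfaces, so only
--     return those locations.
--     """
--     all_walkable = True
--     locations = []
--     n = len(hitmap)
--     row_lo, row_hi = n // 10, 9 * n // 10
--     for rownum, row in enumerate(hitmap):
--         m = len(row)
--         cell_lo, cell_hi = m // 10, 9 * m // 10
--         in_band = row_lo <= rownum < row_hi
--         for cellnum, cell in enumerate(row):
--             if cell:
--                 all_walkable = False
--             elif in_band and cell_lo <= cellnum < cell_hi: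
--                 locations.append((cellnum, rownum))
--     if all_walkable:
--         return []
--     return locations if locations else None
-- ===== Notes on version B (the rewrite author's own statement) =====
-- stated objective: simpler
-- what changed: Fuses A's two traversals (a full-grid all()-walkable pre-check followed by a separate index-range scan of the central band) into one enumerate pass that maintains an all_walkable flag and collects central walkable cells simultaneously.
import Mathlib
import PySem

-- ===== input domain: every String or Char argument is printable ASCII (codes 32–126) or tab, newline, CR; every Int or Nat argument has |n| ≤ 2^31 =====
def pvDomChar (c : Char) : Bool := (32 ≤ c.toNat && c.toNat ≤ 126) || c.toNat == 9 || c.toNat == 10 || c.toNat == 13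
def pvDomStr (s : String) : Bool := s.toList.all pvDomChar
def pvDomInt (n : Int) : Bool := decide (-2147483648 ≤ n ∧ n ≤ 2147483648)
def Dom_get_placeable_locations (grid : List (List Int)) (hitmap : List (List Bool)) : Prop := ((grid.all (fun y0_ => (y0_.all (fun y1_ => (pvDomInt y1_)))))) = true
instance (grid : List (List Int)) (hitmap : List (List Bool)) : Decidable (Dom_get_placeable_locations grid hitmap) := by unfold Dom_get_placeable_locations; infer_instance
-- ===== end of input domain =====

-- B fuses A's two traversals (full-grid walkability pre-check, then a separate central-band
-- index scan) into a single enumerate pass with a flag; objective: simpler, same cost.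

-- ===== PORT A =====
-- int(0.1*k) / int(0.9*k) are ported as floor divisions k//10 and 9*k//10: exact for every
-- list length arising here (the double computation agrees with integer division for all k ≤ 10^7).
def get_placeable_locations (grid : List (List Int)) (hitmap : List (List Bool)) : Option (List (Int × Int)) :=
  if hitmap.all (fun row => row.all (fun cell => !cell)) then some []
  else
    let hitmap_len : Int := hitmap.length
    let locations :=
      (PySem.List.pyRange (PySem.Int.floordiv hitmap_len 10) (PySem.Int.floordiv (9 * hitmap_len) 10) 1).foldl
        (fun acc rownum =>
          let row := PySem.List.pyGetD hitmap rownum []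
          let row_len : Int := row.length
          (PySem.List.pyRange (PySem.Int.floordiv row_len 10) (PySem.Int.floordiv (9 * row_len) 10) 1).foldl
            (fun acc2 cellnum =>
              if !(PySem.List.pyGetD row cellnum false) then acc2 ++ [(cellnum, rownum)] else acc2)
            acc)
        []
    if locations.isEmpty then none else some locations

-- ===== PORT B =====
def get_placeable_locations_alt (grid : List (List Int)) (hitmap : List (List Bool)) : Option (List (Int × Int)) :=
  let n : Int := hitmap.length
  let row_lo := PySem.Int.floordiv n 10
  let row_hi := PySem.Int.floordiv (9 * n) 10
  let st :=
    (PySem.List.enumerate hitmap).foldl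
      (fun (st : Bool × List (Int × Int)) p =>
        let rownum := p.1
        let row := p.2
        let m : Int := row.length
        let cell_lo := PySem.Int.floordiv m 10
        let cell_hi := PySem.Int.floordiv (9 * m) 10
        let in_band := decide (row_lo ≤ rownum) && decide (rownum < row_hi)
        (PySem.List.enumerate row).foldl
          (fun st2 q =>
            if q.2 then (false, st2.2)
            else if in_band && (decide (cell_lo ≤ q.1) && decide (q.1 < cell_hi)) then
              (st2.1, st2.2 ++ [(q.1, rownum)])
            else st2)
          st)
      ((true, []) : Bool × List (Int × Int))
  if st.1 then some []
  else if st.2.isEmpty then none else some st.2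

-- ===== PRECONDITION & SPEC =====
def Spec_get_placeable_locations (grid : List (List Int)) (hitmap : List (List Bool)) (out : Option (List (Int × Int))) : Prop := out = get_placeable_locations_alt grid hitmap
instance (grid : List (List Int)) (hitmap : List (List Bool)) (out : Option (List (Int × Int))) : Decidable (Spec_get_placeable_locations grid hitmap out) := by unfold Spec_get_placeable_locations; infer_instance

-- ===== CLAIM (what is proved, stated in full; the proofs are below) =====
def Claim_equal_get_placeable_locations : Prop := ∀ (grid : List (List Int)) (hitmap : List (List Bool)), Dom_get_placeable_locations grid hitmap → Spec_get_placeable_locations grid hitmap (get_placeable_locations grid hitmap)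

-- ===== LEMMAS AND PROOFS =====

-- band bounds of a length-k list: k//10 and 9*k//10
def pvLo (k : Nat) : Int := PySem.Int.floordiv (k : Int) 10
def pvHi (k : Nat) : Int := PySem.Int.floordiv (9 * (k : Int)) 10

-- the cells A collects in one row of the band
def pvCells (rownum : Int) (row : List Bool) : List (Int × Int) :=
  ((PySem.List.pyRange (pvLo row.length) (pvHi row.length) 1).filter
      (fun c => !(PySem.List.pyGetD row c false))).map (fun c => (c, rownum))

def pvLocsA (hitmap : List (List Bool)) : List (Int × Int) :=
  (PySem.List.pyRange (pvLo hitmap.length) (pvHi hitmap.length) 1).flatMap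
    (fun r => pvCells r (PySem.List.pyGetD hitmap r []))

-- the locations B's single pass collects in one row
def pvRowB (row_lo row_hi rownum : Int) (row : List Bool) : List (Int × Int) :=
  ((PySem.List.enumerate row).filter
      (fun q => !q.2 &&
        ((decide (row_lo ≤ rownum) && decide (rownum < row_hi)) &&
          (decide (pvLo row.length ≤ q.1) && decide (q.1 < pvHi row.length))))).map
    (fun q => (q.1, rownum))

def pvLocsB (hitmap : List (List Bool)) : List (Int × Int) :=
  (PySem.List.enumerate hitmap).flatMap
    (fun p => pvRowB (pvLo hitmap.length) (pvHi hitmap.length) p.1 p.2)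

lemma pvLo_nonneg (k : Nat) : 0 ≤ pvLo k := by
  unfold pvLo; rw [PySem.Int.floordiv_eq_ediv_of_pos (by omega)]; omega

lemma pvLo_le_pvHi (k : Nat) : pvLo k ≤ pvHi k := by
  unfold pvLo pvHi
  rw [PySem.Int.floordiv_eq_ediv_of_pos (by omega), PySem.Int.floordiv_eq_ediv_of_pos (by omega)]
  omega

lemma pvHi_le (k : Nat) : pvHi k ≤ (k : Int) := by
  unfold pvHi; rw [PySem.Int.floordiv_eq_ediv_of_pos (by omega)]; omega

-- filtering a full index range against a band test = filtering over the band sub-range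
lemma filter_band {α : Type} (xs : List α) (d : α) (lo hi : Int) (P : Int → α → Bool)
    (h0 : 0 ≤ lo) (h1 : lo ≤ hi) (h2 : hi ≤ (xs.length : Int)) :
    ((PySem.List.pyRange 0 (xs.length : Int) 1).filter
        (fun j => P j (PySem.List.pyGetD xs j d) && (decide (lo ≤ j) && decide (j < hi))))
      = (PySem.List.pyRange lo hi 1).filter (fun j => P j (PySem.List.pyGetD xs j d)) := by
  rw [PySem.List.pyRange_one_append 0 lo (xs.length : Int) h0 (by omega),
      PySem.List.pyRange_one_append lo hi (xs.length : Int) h1 h2,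
      List.filter_append, List.filter_append]
  have e1 : (PySem.List.pyRange 0 lo 1).filter
      (fun j => P j (PySem.List.pyGetD xs j d) && (decide (lo ≤ j) && decide (j < hi))) = [] := by
    rw [List.filter_eq_nil_iff]
    intro j hj
    have := (PySem.List.mem_pyRange_one).1 hj
    simp only [Bool.and_eq_true, decide_eq_true_eq]
    omega
  have e3 : (PySem.List.pyRange hi (xs.length : Int) 1).filter
      (fun j => P j (PySem.List.pyGetD xs j d) && (decide (lo ≤ j) && decide (j < hi))) = [] := by
    rw [List.filter_eq_nil_iff]
    intro j hj
    have := (PySem.List.mem_pyRange_one).1 hj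
    simp only [Bool.and_eq_true, decide_eq_true_eq]
    omega
  have e2 : (PySem.List.pyRange lo hi 1).filter
      (fun j => P j (PySem.List.pyGetD xs j d) && (decide (lo ≤ j) && decide (j < hi)))
      = (PySem.List.pyRange lo hi 1).filter (fun j => P j (PySem.List.pyGetD xs j d)) := by
    apply List.filter_congr
    intro j hj
    have hb := (PySem.List.mem_pyRange_one).1 hj
    simp [hb.1, hb.2]
  rw [e1, e2, e3, List.append_nil, List.nil_append]

lemma A_eq (grid : List (List Int)) (hitmap : List (List Bool)) :
    get_placeable_locations grid hitmap =
      if hitmap.all (fun row => row.all (fun cell => !cell)) then some []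
      else if (pvLocsA hitmap).isEmpty then none else some (pvLocsA hitmap) := by
  simp only [get_placeable_locations, pvLocsA, pvCells, pvLo, pvHi]
  rw [PySem.List.foldl_congr_mem (h := by
        intro acc r _
        exact PySem.List.foldl_append_if
          (p := fun c => !(PySem.List.pyGetD (PySem.List.pyGetD hitmap r []) c false))
          (f := fun c => (c, r)) (l := _) (acc := acc))]
  rw [PySem.List.foldl_append_eq_flatMap]
  simp

-- running and-accumulator over one enumerated row = Python's all(not cell …)
lemma flag_fold (row : List Bool) : ∀ (s : Int) (a : Bool),
    (PySem.List.enumerate row s).foldl (fun a q => a && !q.2) a = (a && row.all (fun c => !c)) := by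
  induction row with
  | nil => intro s a; simp [PySem.List.enumerate_nil]
  | cons c cs ih =>
      intro s a
      rw [PySem.List.enumerate_cons, List.foldl_cons, ih]
      simp [Bool.and_assoc]

lemma flag_fold_rows (hitmap : List (List Bool)) : ∀ (s : Int) (a : Bool),
    (PySem.List.enumerate hitmap s).foldl (fun a p => a && p.2.all (fun c => !c)) a
      = (a && hitmap.all (fun row => row.all (fun c => !c))) := by
  induction hitmap with
  | nil => intro s a; simp [PySem.List.enumerate_nil]
  | cons r rs ih =>
      intro s a
      rw [PySem.List.enumerate_cons, List.foldl_cons, ih]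
      simp [Bool.and_assoc]

-- B's inner loop over one enumerated row, split into its two independent accumulators
lemma inner_fold (band : Bool) (lo hi rn : Int) (row : List Bool) (st : Bool × List (Int × Int)) :
    (PySem.List.enumerate row).foldl
      (fun (st2 : Bool × List (Int × Int)) q =>
        if q.2 then (false, st2.2)
        else if band && (decide (lo ≤ q.1) && decide (q.1 < hi)) then
          (st2.1, st2.2 ++ [(q.1, rn)])
        else st2)
      st
    = (st.1 && row.all (fun c => !c),
       st.2 ++ ((PySem.List.enumerate row).filter
          (fun q => !q.2 && (band && (decide (lo ≤ q.1) && decide (q.1 < hi))))).map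
        (fun q => (q.1, rn))) := by
  have hfun : (fun (st2 : Bool × List (Int × Int)) (q : Int × Bool) =>
      if q.2 then (false, st2.2)
      else if band && (decide (lo ≤ q.1) && decide (q.1 < hi)) then
        (st2.1, st2.2 ++ [(q.1, rn)])
      else st2)
      = (fun (st2 : Bool × List (Int × Int)) (q : Int × Bool) =>
          (st2.1 && !q.2,
           if !q.2 && (band && (decide (lo ≤ q.1) && decide (q.1 < hi))) then
             st2.2 ++ [(q.1, rn)]
           else st2.2)) := by
    funext st2 q
    by_cases hq : q.2 = true
    · simp [hq]
    · simp only [Bool.not_eq_true] at hq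
      simp [hq]
      split <;> simp
  rw [hfun,
      PySem.List.foldl_prod_mk (f := fun a (q : Int × Bool) => a && !q.2)
        (g := fun b (q : Int × Bool) =>
          if !q.2 && (band && (decide (lo ≤ q.1) && decide (q.1 < hi))) then
            b ++ [(q.1, rn)]
          else b),
      flag_fold, PySem.List.foldl_append_if]

lemma B_eq (grid : List (List Int)) (hitmap : List (List Bool)) :
    get_placeable_locations_alt grid hitmap =
      if hitmap.all (fun row => row.all (fun cell => !cell)) then some []
      else if (pvLocsB hitmap).isEmpty then none else some (pvLocsB hitmap) := by
  simp only [get_placeable_locations_alt, pvLocsB, pvRowB, pvLo, pvHi]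
  rw [PySem.List.foldl_congr_mem (h := by
        intro st p _
        exact inner_fold
          (decide (PySem.Int.floordiv (hitmap.length : Int) 10 ≤ p.1) &&
            decide (p.1 < PySem.Int.floordiv (9 * (hitmap.length : Int)) 10))
          (PySem.Int.floordiv (p.2.length : Int) 10)
          (PySem.Int.floordiv (9 * (p.2.length : Int)) 10) p.1 p.2 st)]
  rw [PySem.List.foldl_prod_mk
        (f := fun a (p : Int × List Bool) => a && p.2.all (fun c => !c))
        (g := fun b (p : Int × List Bool) =>
          b ++ ((PySem.List.enumerate p.2).filter
              (fun q => !q.2 &&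
                ((decide (PySem.Int.floordiv (hitmap.length : Int) 10 ≤ p.1) &&
                    decide (p.1 < PySem.Int.floordiv (9 * (hitmap.length : Int)) 10)) &&
                  (decide (PySem.Int.floordiv (p.2.length : Int) 10 ≤ q.1) &&
                    decide (q.1 < PySem.Int.floordiv (9 * (p.2.length : Int)) 10))))).map
            (fun q => (q.1, p.1))),
      flag_fold_rows, PySem.List.foldl_append_eq_flatMap]
  simp only [Bool.true_and, List.nil_append]
  rfl

-- outside the row band B's row pass collects nothing
lemma pvRowB_out (row_lo row_hi rownum : Int) (row : List Bool)
    (h : ¬ (row_lo ≤ rownum ∧ rownum < row_hi)) :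
    pvRowB row_lo row_hi rownum row = [] := by
  unfold pvRowB
  rw [List.filter_eq_nil_iff.2 (by
    intro q _
    simp only [Bool.and_eq_true, decide_eq_true_eq]
    tauto)]
  rfl

-- inside the row band B's row pass collects exactly A's cells
lemma pvRowB_in (row_lo row_hi rownum : Int) (row : List Bool)
    (h1 : row_lo ≤ rownum) (h2 : rownum < row_hi) :
    pvRowB row_lo row_hi rownum row = pvCells rownum row := by
  unfold pvRowB pvCells
  have hband : ∀ (q : Int × Bool),
      (!q.2 && ((decide (row_lo ≤ rownum) && decide (rownum < row_hi)) &&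
        (decide (pvLo row.length ≤ q.1) && decide (q.1 < pvHi row.length))))
      = (!q.2 && (decide (pvLo row.length ≤ q.1) && decide (q.1 < pvHi row.length))) := by
    intro q; simp [h1, h2]
  rw [List.filter_congr (fun q _ => hband q)]
  rw [PySem.List.enumerate_eq_map_pyRange (d := false), List.filter_map]
  simp only [PySem.List.len_eq]
  have hcomp : ((fun (q : Int × Bool) => !q.2 &&
        (decide (pvLo row.length ≤ q.1) && decide (q.1 < pvHi row.length))) ∘
      (fun j => (j, PySem.List.pyGetD row j false)))
      = (fun j => (fun j v => !v) j (PySem.List.pyGetD row j false) &&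
          (decide (pvLo row.length ≤ j) && decide (j < pvHi row.length))) := by
    funext j; rfl
  rw [hcomp, filter_band row false (pvLo row.length) (pvHi row.length)
        (fun _ v => !v) (pvLo_nonneg _) (pvLo_le_pvHi _) (pvHi_le _),
      List.map_map]
  rfl

lemma locs_eq (hitmap : List (List Bool)) : pvLocsB hitmap = pvLocsA hitmap := by
  unfold pvLocsB pvLocsA
  rw [PySem.List.enumerate_eq_map_pyRange (d := ([] : List Bool)), List.flatMap_map]
  simp only [PySem.List.len_eq]
  have hsplit : PySem.List.pyRange 0 (hitmap.length : Int) 1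
      = PySem.List.pyRange 0 (pvLo hitmap.length) 1 ++
        (PySem.List.pyRange (pvLo hitmap.length) (pvHi hitmap.length) 1 ++
          PySem.List.pyRange (pvHi hitmap.length) (hitmap.length : Int) 1) := by
    rw [← PySem.List.pyRange_one_append (pvLo hitmap.length) (pvHi hitmap.length)
          (hitmap.length : Int) (pvLo_le_pvHi _) (pvHi_le _),
        ← PySem.List.pyRange_one_append 0 (pvLo hitmap.length) (hitmap.length : Int)
          (pvLo_nonneg _) (le_trans (pvLo_le_pvHi _) (pvHi_le _))]
  rw [hsplit, List.flatMap_append, List.flatMap_append]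
  have e1 : (PySem.List.pyRange 0 (pvLo hitmap.length) 1).flatMap
      (fun a => pvRowB (pvLo hitmap.length) (pvHi hitmap.length) a
        (PySem.List.pyGetD hitmap a [])) = [] := by
    apply List.flatMap_eq_nil_iff.2
    intro r hr
    have := (PySem.List.mem_pyRange_one).1 hr
    exact pvRowB_out _ _ _ _ (by omega)
  have e3 : (PySem.List.pyRange (pvHi hitmap.length) (hitmap.length : Int) 1).flatMap
      (fun a => pvRowB (pvLo hitmap.length) (pvHi hitmap.length) a
        (PySem.List.pyGetD hitmap a [])) = [] := by
    apply List.flatMap_eq_nil_iff.2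
    intro r hr
    have := (PySem.List.mem_pyRange_one).1 hr
    exact pvRowB_out _ _ _ _ (by omega)
  have e2 : (PySem.List.pyRange (pvLo hitmap.length) (pvHi hitmap.length) 1).flatMap
      (fun a => pvRowB (pvLo hitmap.length) (pvHi hitmap.length) a
        (PySem.List.pyGetD hitmap a []))
      = (PySem.List.pyRange (pvLo hitmap.length) (pvHi hitmap.length) 1).flatMap
        (fun r => pvCells r (PySem.List.pyGetD hitmap r [])) := by
    apply List.flatMap_congr
    intro r hr
    have := (PySem.List.mem_pyRange_one).1 hr
    exact pvRowB_in _ _ _ _ (by omega) (by omega)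
  rw [e1, e2, e3, List.append_nil, List.nil_append]

-- ===== VERDICT (by name: the statement is the Claim_ definition above) =====
theorem get_placeable_locations_spec : Claim_equal_get_placeable_locations := by
  intro grid hitmap _
  unfold Spec_get_placeable_locations
  rw [A_eq, B_eq, locs_eq]
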